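-- pv_equiv track=rewrite | github.com/ImKartikey27/secret | results/enrich.py | merge_company_data
-- ===== SOURCE A (Python) =====
-- def merge_company_data(companies_list):
--     merged = {}
--
--     for companies in companies_list:
--         for company in companies:
--             key = company.get('company_name') or company.get('seller_name') or 'unknown'
--
--             if key not in merged:
--                 merged[key] = company.copy()
--             else:
--                 for field, value in company.items():
--                     if value is not None and (field not in merged[key] or merged[key][field] is None):
--                         merged[key][field] = value
--
--     return list(merged.values())
-- ===== SOURCE B (Python) =====
-- def merge_company_data(companies_list):
--     groups = {}
--     for companies in companies_list:
--         for company in companies: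
--             key = company.get('company_name') or company.get('seller_name') or 'unknown'
--             groups.setdefault(key, []).append(company)
--     result = []
--     for group in groups.values():
--         merged = group[0].copy()
--         for company in group[1:]:
--             for field, value in company.items():
--                 if value is not None and (field not in merged or merged[field] is None):
--                     merged[field] = value
--         result.append(merged)
--     return result
-- ===== Notes on version B (the rewrite author's own statement) =====
-- stated objective: alternative
-- what changed: B first builds a grouping dict mapping each merge key to the ordered list of its companies, then reduces each group separately (seed with the first company, fill from the rest), instead of A's single pass that merges each company into the accumulator dict inline.
import Mathlib
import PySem

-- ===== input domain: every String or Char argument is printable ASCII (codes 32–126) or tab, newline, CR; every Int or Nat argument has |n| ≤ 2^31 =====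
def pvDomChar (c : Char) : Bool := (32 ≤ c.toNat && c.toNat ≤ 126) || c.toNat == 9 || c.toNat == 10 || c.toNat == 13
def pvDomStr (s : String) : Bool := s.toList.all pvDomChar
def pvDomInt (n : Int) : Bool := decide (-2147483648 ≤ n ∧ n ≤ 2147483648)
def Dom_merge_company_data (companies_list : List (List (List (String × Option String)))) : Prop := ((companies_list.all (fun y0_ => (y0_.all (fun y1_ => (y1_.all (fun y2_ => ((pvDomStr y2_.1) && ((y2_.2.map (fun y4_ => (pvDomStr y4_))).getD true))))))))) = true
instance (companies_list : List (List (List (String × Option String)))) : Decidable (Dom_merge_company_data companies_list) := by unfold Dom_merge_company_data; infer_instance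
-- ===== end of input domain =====

-- B replaces A's single inline-merge pass by a group-then-reduce decomposition (alternative, same cost).

-- ===== PORT A =====
-- key = company.get('company_name') or company.get('seller_name') or 'unknown'
-- (Python 'or' falls through on a missing key, a stored None, and the empty string)
def pvTruthyGet (c : PySem.Dict String (Option String)) (k : String) : Option String :=
  match c.get? k with
  | some (some s) => if s = "" then none else some s
  | _ => none

def pvKeyOf (c : PySem.Dict String (Option String)) : String :=
  match pvTruthyGet c "company_name" with
  | some s => s
  | none =>
    match pvTruthyGet c "seller_name" with
    | some s => s
    | none => "unknown"

-- the inner 'for field, value in company.items(): …' fill loop (textually identical in A and in Source B)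
def pvFill (m : PySem.Dict String (Option String)) (c : PySem.Dict String (Option String)) :
    PySem.Dict String (Option String) :=
  c.items.foldl (fun m fv =>
    if fv.2 ≠ none ∧ (m.get? fv.1 = none ∨ m.get? fv.1 = some none) then m.insert fv.1 fv.2 else m) m

def merge_company_data (companies_list : List (List (List (String × Option String)))) :
    List (List (String × Option String)) :=
  let merged : PySem.Dict String (PySem.Dict String (Option String)) :=
    companies_list.foldl (fun merged companies =>
      companies.foldl (fun merged company =>
        let c := PySem.Dict.ofList company
        let key := pvKeyOf c
        match merged.get? key with
        | none => merged.insert key c                       -- key not in merged: merged[key] = company.copy()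
        | some cur => merged.insert key (pvFill cur c)      -- in-place field fill of merged[key]
        ) merged) PySem.Dict.empty
  merged.values.map PySem.Dict.items

-- ===== PORT B =====
-- merged = group[0].copy(), then fill from group[1:]
def pvReduceGroup (grp : List (PySem.Dict String (Option String))) : PySem.Dict String (Option String) :=
  match grp with
  | [] => PySem.Dict.empty   -- unreachable: groups only hold nonempty lists
  | h :: t => t.foldl pvFill h

def merge_company_data_alt (companies_list : List (List (List (String × Option String)))) :
    List (List (String × Option String)) :=
  let groups : PySem.Dict String (List (PySem.Dict String (Option String))) :=
    companies_list.foldl (fun groups companies =>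
      companies.foldl (fun groups company =>
        let c := PySem.Dict.ofList company
        let key := pvKeyOf c
        groups.insert key (groups.getD key [] ++ [c])       -- groups.setdefault(key, []).append(company)
        ) groups) PySem.Dict.empty
  groups.values.foldl (fun result grp => result ++ [(pvReduceGroup grp).items]) []

-- ===== PRECONDITION & SPEC =====
def Spec_merge_company_data (companies_list : List (List (List (String × Option String)))) (out : List (List (String × Option String))) : Prop := out = merge_company_data_alt companies_list
instance (companies_list : List (List (List (String × Option String)))) (out : List (List (String × Option String))) : Decidable (Spec_merge_company_data companies_list out) := by unfold Spec_merge_company_data; infer_instance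

-- ===== CLAIM (what is proved, stated in full; the proofs are below) =====
def Claim_equal_merge_company_data : Prop := ∀ (companies_list : List (List (List (String × Option String)))), Dom_merge_company_data companies_list → Spec_merge_company_data companies_list (merge_company_data companies_list)

-- ===== LEMMAS AND PROOFS =====

-- A's per-company step and B's per-company step, named for the proofs
def pvStepA (m : PySem.Dict String (PySem.Dict String (Option String)))
    (company : List (String × Option String)) : PySem.Dict String (PySem.Dict String (Option String)) :=
  let c := PySem.Dict.ofList company
  let key := pvKeyOf c
  match m.get? key with
  | none => m.insert key c
  | some cur => m.insert key (pvFill cur c)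

def pvStepB (g : PySem.Dict String (List (PySem.Dict String (Option String))))
    (company : List (String × Option String)) : PySem.Dict String (List (PySem.Dict String (Option String))) :=
  let c := PySem.Dict.ofList company
  let key := pvKeyOf c
  g.insert key (g.getD key [] ++ [c])

def pvPairF (p : String × List (PySem.Dict String (Option String))) :
    String × PySem.Dict String (Option String) := (p.1, pvReduceGroup p.2)

-- coupling invariant between A's merged dict and B's groups dict
def pvInv (m : PySem.Dict String (PySem.Dict String (Option String)))
    (g : PySem.Dict String (List (PySem.Dict String (Option String)))) : Prop :=
  m.items = g.items.map pvPairF ∧ g.keys.Nodup ∧ ∀ p ∈ g.items, p.2 ≠ []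

theorem pvReduceGroup_append (grp : List (PySem.Dict String (Option String)))
    (h : grp ≠ []) (c : PySem.Dict String (Option String)) :
    pvReduceGroup (grp ++ [c]) = pvFill (pvReduceGroup grp) c := by
  cases grp with
  | nil => exact absurd rfl h
  | cons x t => simp [pvReduceGroup, List.foldl_append]

theorem pvInv_step (m : PySem.Dict String (PySem.Dict String (Option String)))
    (g : PySem.Dict String (List (PySem.Dict String (Option String))))
    (hinv : pvInv m g) (company : List (String × Option String)) :
    pvInv (pvStepA m company) (pvStepB g company) := by
  obtain ⟨h1, h2, h3⟩ := hinv
  set c := PySem.Dict.ofList company with hc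
  set k := pvKeyOf c with hk
  have hkeys : m.keys = g.keys := by
    show m.items.map (·.1) = g.items.map (·.1)
    rw [h1, List.map_map]; rfl
  refine ⟨?_, ?_, ?_⟩
  · -- items correspondence
    show (match m.get? k with
          | none => m.insert k c
          | some cur => m.insert k (pvFill cur c)).items
        = (g.insert k (g.getD k [] ++ [c])).items.map pvPairF
    cases hg : g.get? k with
    | none =>
      have hgc : g.contains k = false := by
        rw [PySem.Dict.contains_eq_isSome_get?, hg]; rfl
      have hm : m.get? k = none := by
        rw [PySem.Dict.get?_eq_none_iff_not_mem_keys] at hg ⊢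
        rw [hkeys]; exact hg
      have hmc : m.contains k = false := by
        rw [PySem.Dict.contains_eq_isSome_get?, hm]; rfl
      rw [hm]
      simp only [PySem.Dict.getD_of_not_contains g _ hgc]
      rw [PySem.Dict.items_insert_of_not_contains _ _ hmc,
          PySem.Dict.items_insert_of_not_contains _ _ hgc, List.map_append, h1]
      rfl
    | some grp =>
      have hgrp_mem : (k, grp) ∈ g.items := PySem.Dict.mem_items_of_get?_eq_some g hg
      have hgrpne : grp ≠ [] := h3 _ hgrp_mem
      have hmnodup : m.keys.Nodup := by rw [hkeys]; exact h2
      have hmk : m.get? k = some (pvReduceGroup grp) := by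
        have : (k, pvReduceGroup grp) ∈ m.items := by
          rw [h1]; exact List.mem_map_of_mem hgrp_mem
        exact PySem.Dict.get?_of_mem_items m this hmnodup
      have hgc : g.contains k = true := by
        rw [PySem.Dict.contains_eq_isSome_get?, hg]; rfl
      have hmc : m.contains k = true := by
        rw [PySem.Dict.contains_eq_isSome_get?, hmk]; rfl
      rw [hmk]
      simp only [PySem.Dict.getD_eq_get?_getD, hg, Option.getD_some]
      rw [PySem.Dict.items_insert_of_contains _ _ hmc,
          PySem.Dict.items_insert_of_contains _ _ hgc, h1, List.map_map, List.map_map]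
      apply List.map_congr_left
      intro p hp
      by_cases hpk : p.1 = k
      · have : g.get? k = some p.2 := by
          have : (k, p.2) ∈ g.items := by rw [← hpk]; exact hp
          exact PySem.Dict.get?_of_mem_items g this h2
        have hp2 : p.2 = grp := by rw [hg] at this; exact (Option.some_inj.mp this).symm
        simp [Function.comp, pvPairF, hpk, hp2, pvReduceGroup_append grp hgrpne c]
      · have hbeq : (p.1 == k) = false := by simp [hpk]
        simp [Function.comp, pvPairF, hbeq]
  · -- keys of the groups dict stay Nodup
    show (g.insert k (g.getD k [] ++ [c])).keys.Nodup
    exact PySem.Dict.nodup_keys_insert _ _ _ h2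
  · -- groups stay nonempty
    show ∀ p ∈ (g.insert k (g.getD k [] ++ [c])).items, p.2 ≠ []
    intro p hp
    rcases (PySem.Dict.mem_items_insert _ _ _ _).mp hp with h | ⟨hmem, _⟩
    · subst h; simp
    · exact h3 _ hmem

theorem pvInv_foldl (companies : List (List (String × Option String)))
    (m : PySem.Dict String (PySem.Dict String (Option String)))
    (g : PySem.Dict String (List (PySem.Dict String (Option String))))
    (hinv : pvInv m g) :
    pvInv (companies.foldl pvStepA m) (companies.foldl pvStepB g) := by
  induction companies generalizing m g with
  | nil => exact hinv
  | cons c t ih => exact ih _ _ (pvInv_step m g hinv c)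

theorem pvInv_foldl2 (L : List (List (List (String × Option String))))
    (m : PySem.Dict String (PySem.Dict String (Option String)))
    (g : PySem.Dict String (List (PySem.Dict String (Option String))))
    (hinv : pvInv m g) :
    pvInv (L.foldl (fun m cs => cs.foldl pvStepA m) m) (L.foldl (fun g cs => cs.foldl pvStepB g) g) := by
  induction L generalizing m g with
  | nil => exact hinv
  | cons cs t ih => exact ih _ _ (pvInv_foldl cs m g hinv)

-- ===== VERDICT (by name: the statement is the Claim_ definition above) =====
theorem merge_company_data_spec : Claim_equal_merge_company_data := by
  intro L _
  unfold Spec_merge_company_data merge_company_data merge_company_data_alt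
  have h := pvInv_foldl2 L PySem.Dict.empty PySem.Dict.empty ⟨rfl, List.nodup_nil, by intro p hp; cases hp⟩
  obtain ⟨h1, _, _⟩ := h
  show (L.foldl (fun m cs => cs.foldl pvStepA m) PySem.Dict.empty).values.map PySem.Dict.items
      = (L.foldl (fun g cs => cs.foldl pvStepB g) PySem.Dict.empty).values.foldl
          (fun result grp => result ++ [(pvReduceGroup grp).items]) []
  rw [PySem.List.foldl_append_singleton_eq_map, List.nil_append]
  show (((L.foldl (fun m cs => cs.foldl pvStepA m) PySem.Dict.empty).items.map (·.2)).map PySem.Dict.items)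
      = ((L.foldl (fun g cs => cs.foldl pvStepB g) PySem.Dict.empty).items.map (·.2)).map
          (fun grp => (pvReduceGroup grp).items)
  rw [h1, List.map_map, List.map_map, List.map_map]
  rfl
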